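-- pv_equiv track=rewrite | github.com/l1004ga/coding_test | 프로그래머스/lv2/42842. 카펫/카펫.py | make_divisor
-- ===== SOURCE A (Python) =====
-- def make_divisor(num):
--
--     data = set()
--     for n in range(1, num+1):
--         if num % n == 0:
--             if int(num / n) > 2 and n > 2:
--                 if int(num / n) >= n:
--                     data.add((int(num / n), n))
--                 else:
--                     data.add((n, (int(num / n))))
--
--     return data
-- ===== SOURCE B (Python) =====
-- def make_divisor(num):
--     # O(sqrt(num)): scan only candidate smaller factors n = 3..floor(sqrt(num));
--     # every qualifying pair appears exactly once as (num // n, n).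
--     data = set()
--     n = 3
--     while n * n <= num:
--         if num % n == 0:
--             data.add((num // n, n))
--         n += 1
--     return data
-- ===== Notes on version B (the rewrite author's own statement) =====
-- stated objective: faster
-- what changed: B scans only candidate smaller factors n = 3..floor(sqrt(num)) and emits (num // n, n) directly, instead of A's scan of every n in 1..num with normalization of each divisor pair.
import Mathlib
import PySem

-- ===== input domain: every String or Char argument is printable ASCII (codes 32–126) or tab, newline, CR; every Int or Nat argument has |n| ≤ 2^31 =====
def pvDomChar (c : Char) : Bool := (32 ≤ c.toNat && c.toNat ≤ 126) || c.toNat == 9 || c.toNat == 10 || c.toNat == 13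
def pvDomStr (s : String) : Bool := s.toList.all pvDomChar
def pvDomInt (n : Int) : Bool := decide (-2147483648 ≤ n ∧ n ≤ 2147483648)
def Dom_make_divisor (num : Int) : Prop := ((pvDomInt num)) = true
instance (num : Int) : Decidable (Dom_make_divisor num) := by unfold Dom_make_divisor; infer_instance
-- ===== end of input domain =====

-- B replaces A's full scan n = 1..num by a scan of the smaller factors n = 3..⌊√num⌋ only,
-- emitting (num // n, n) directly (objective: faster).

-- ===== PORT A =====
-- one loop step of A's for-loop (int(num / n) is exact truncating division here: |num| ≤ 2^31 < 2^53)
def stepA (num : Int) (data : List (Int × Int)) (n : Int) : List (Int × Int) :=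
  if PySem.Int.mod num n = 0 then
    if 2 < PySem.Int.truncdiv num n ∧ 2 < n then
      if n ≤ PySem.Int.truncdiv num n then
        PySem.Set.add data (PySem.Int.truncdiv num n, n)
      else
        PySem.Set.add data (n, PySem.Int.truncdiv num n)
    else data
  else data

def make_divisor (num : Int) : List (Int × Int) :=
  (PySem.List.pyRange 1 (num + 1) 1).foldl (stepA num) PySem.Set.empty

-- ===== PORT B =====
-- termination fact for the port of B's while-loop: n ≤ n*n over Int
theorem int_le_mul_self (n : Int) : n ≤ n * n := by
  rcases le_total n 0 with h | h
  · exact h.trans (mul_self_nonneg n)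
  · nlinarith

def altGo (num n : Int) (data : List (Int × Int)) : List (Int × Int) :=
  if n * n ≤ num then
    altGo num (n + 1)
      (if PySem.Int.mod num n = 0 then
        PySem.Set.add data (PySem.Int.floordiv num n, n)
      else data)
  else data
termination_by (num + 1 - n).toNat
decreasing_by
  have h2 : n ≤ num := le_trans (int_le_mul_self n) (by assumption)
  omega

def make_divisor_alt (num : Int) : List (Int × Int) :=
  altGo num 3 PySem.Set.empty

-- ===== PRECONDITION & SPEC =====
def Spec_make_divisor (num : Int) (out : List (Int × Int)) : Prop := out = make_divisor_alt num
instance (num : Int) (out : List (Int × Int)) : Decidable (Spec_make_divisor num out) := by unfold Spec_make_divisor; infer_instance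

-- ===== CLAIM (what is proved, stated in full; the proofs are below) =====
def Claim_equal_make_divisor : Prop := ∀ (num : Int), Dom_make_divisor num → Spec_make_divisor num (make_divisor num)

-- ===== LEMMAS AND PROOFS =====

-- the canonical list both programs produce: divisors k of num with lo ≤ k ≤ hi, as (num // k, k)
def divisorRange (num lo hi : Int) : List (Int × Int) :=
  ((PySem.List.pyRange lo (hi + 1) 1).filter (fun k => PySem.Int.mod num k = 0)).map
    (fun k => (PySem.Int.floordiv num k, k))

theorem le_sqrt_iff (num n : Int) (hn : 1 ≤ n) : n ≤ Int.sqrt num ↔ n * n ≤ num := by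
  unfold Int.sqrt
  constructor
  · intro h
    have h1 : 1 ≤ Nat.sqrt num.toNat := by exact_mod_cast le_trans hn h
    have h0 : 0 < num.toNat := Nat.sqrt_pos.mp (by omega)
    have hc1 : (n.toNat : Int) = n := by omega
    have hc2 : (num.toNat : Int) = num := by omega
    have hnn : n.toNat * n.toNat ≤ num.toNat := by
      calc n.toNat * n.toNat ≤ Nat.sqrt num.toNat * Nat.sqrt num.toNat :=
            Nat.mul_le_mul (by omega) (by omega)
        _ ≤ num.toNat := by nlinarith [Nat.sqrt_le' num.toNat]
    have hi : (n.toNat : Int) * (n.toNat : Int) ≤ (num.toNat : Int) := by exact_mod_cast hnn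
    rw [hc1, hc2] at hi
    exact hi
  · intro h
    have hnum : 1 ≤ num := le_trans (by nlinarith) h
    have hc1 : (n.toNat : Int) = n := by omega
    have hc2 : (num.toNat : Int) = num := by omega
    have hnn : n.toNat ^ 2 ≤ num.toNat := by
      have hi : (n.toNat : Int) * (n.toNat : Int) ≤ (num.toNat : Int) := by rw [hc1, hc2]; exact h
      have hN : n.toNat * n.toNat ≤ num.toNat := by exact_mod_cast hi
      nlinarith
    have := (Nat.le_sqrt').mpr hnn
    omega

theorem sqrt_le_self_int (num : Int) (h : 0 ≤ num) : Int.sqrt num ≤ num := by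
  unfold Int.sqrt
  have := Nat.sqrt_le_self num.toNat
  omega

theorem mem_divisorRange (num lo hi : Int) (p : Int × Int) (hp : p ∈ divisorRange num lo hi) :
    lo ≤ p.2 ∧ p.2 ≤ hi ∧ PySem.Int.mod num p.2 = 0 ∧ p.1 = PySem.Int.floordiv num p.2 := by
  simp only [divisorRange, List.mem_map, List.mem_filter, PySem.List.mem_pyRange_one,
    decide_eq_true_eq] at hp
  obtain ⟨k, ⟨⟨hk1, hk2⟩, hk3⟩, rfl⟩ := hp
  exact ⟨hk1, by omega, hk3, rfl⟩

theorem mem_divisorRange_of (num lo hi k : Int) (h1 : lo ≤ k) (h2 : k ≤ hi)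
    (h3 : PySem.Int.mod num k = 0) :
    (PySem.Int.floordiv num k, k) ∈ divisorRange num lo hi := by
  simp only [divisorRange, List.mem_map, List.mem_filter, PySem.List.mem_pyRange_one,
    decide_eq_true_eq]
  exact ⟨k, ⟨⟨h1, by omega⟩, h3⟩, rfl⟩

theorem divisorRange_empty (num lo hi : Int) (h : hi < lo) : divisorRange num lo hi = [] := by
  unfold divisorRange
  rw [PySem.List.pyRange_one]
  have : (hi + 1 - lo).toNat = 0 := by omega
  simp [this]

theorem divisorRange_succ_hi (num lo hi : Int) (h : lo ≤ hi + 1) :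
    divisorRange num lo (hi + 1) = divisorRange num lo hi ++
      (if PySem.Int.mod num (hi + 1) = 0 then
        [(PySem.Int.floordiv num (hi + 1), hi + 1)] else []) := by
  unfold divisorRange
  rw [PySem.List.pyRange_one_succ_right h]
  rw [List.filter_append, List.map_append]
  congr 1
  simp only [List.filter_cons, List.filter_nil, decide_eq_true_eq]
  split_ifs with hd <;> simp

-- B's loop from n accumulates exactly divisorRange num n (Int.sqrt num), for data "fresh below n"
theorem altGo_eq (num : Int) : ∀ (n : Int) (data : List (Int × Int)), 3 ≤ n →
    (∀ p ∈ data, p.2 < n) → altGo num n data = data ++ divisorRange num n (Int.sqrt num) := by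
  intro n data
  induction n, data using altGo.induct num with
  | case1 n data hle ih =>
    intro hn hfresh
    rw [altGo]
    simp only [if_pos hle]
    have hnsq : n ≤ Int.sqrt num := (le_sqrt_iff num n (by omega)).mpr hle
    have hcons : PySem.List.pyRange n (Int.sqrt num + 1) =
        n :: PySem.List.pyRange (n + 1) (Int.sqrt num + 1) :=
      PySem.List.pyRange_one_cons (by omega)
    have hrec := ih (by omega) (by
      intro p hp
      split at hp
      · rcases (PySem.Set.mem_add _ _ _).mp hp with h | h
        · exact lt_trans (hfresh p h) (by omega)
        · simp [h]
      · exact lt_trans (hfresh p hp) (by omega))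
    simp only [dite_eq_ite] at hrec
    rw [hrec]
    unfold divisorRange
    rw [hcons]
    by_cases hd : PySem.Int.mod num n = 0
    · have hnot : (PySem.Int.floordiv num n, n) ∉ data := by
        intro hmem
        exact absurd (hfresh _ hmem) (lt_irrefl n)
      rw [if_pos hd, PySem.Set.add_of_not_mem hnot]
      simp [hd]
    · rw [if_neg hd]
      simp [hd]
  | case2 n data hle =>
    intro hn hfresh
    rw [altGo]
    simp only [if_neg hle]
    have hlt : Int.sqrt num < n := by
      by_contra hc
      exact hle ((le_sqrt_iff num n (by omega)).mp (by omega))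
    rw [divisorRange_empty num n (Int.sqrt num) hlt, List.append_nil]

-- A's loop over 1..j accumulates exactly divisorRange num 3 (min j √num)
theorem afold (num : Int) (hnum : 1 ≤ num) : ∀ (j : Nat), (j : Int) ≤ num →
    (PySem.List.pyRange 1 ((j : Int) + 1) 1).foldl (stepA num) [] =
      divisorRange num 3 (min (j : Int) (Int.sqrt num)) := by
  intro j
  induction j with
  | zero =>
    intro _
    have h1 : PySem.List.pyRange 1 (0 + 1) 1 = ([] : List Int) := by
      rw [PySem.List.pyRange_one]; simp
    have h2 : min (0 : Int) (Int.sqrt num) = 0 := min_eq_left (Int.sqrt_nonneg num)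
    simp only [Nat.cast_zero, h1, h2, List.foldl_nil]
    rw [divisorRange_empty num 3 0 (by omega)]
  | succ j ih =>
    intro hle
    have hle' : (j : Int) ≤ num := by push_cast at hle ⊢; omega
    have hcast : ((j + 1 : Nat) : Int) = (j : Int) + 1 := by push_cast; ring
    rw [hcast, PySem.List.pyRange_one_succ_right (show (1 : Int) ≤ (j : Int) + 1 by omega),
      List.foldl_append, ih hle']
    set n : Int := (j : Int) + 1 with hn_def
    have hn1 : 1 ≤ n := by omega
    have hnle : n ≤ num := by omega
    have hs0 : 0 ≤ Int.sqrt num := Int.sqrt_nonneg num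
    simp only [List.foldl_cons, List.foldl_nil]
    by_cases hcmp : n ≤ Int.sqrt num
    · have hm1 : min ((j : Int)) (Int.sqrt num) = (j : Int) := min_eq_left (by omega)
      have hm2 : min n (Int.sqrt num) = n := min_eq_left hcmp
      rw [hm1, hm2]
      by_cases h3 : 3 ≤ n
      · rw [hn_def, divisorRange_succ_hi num 3 (j : Int) (by omega), ← hn_def]
        unfold stepA
        by_cases hd : PySem.Int.mod num n = 0
        · have hdvd : n ∣ num := (PySem.Int.mod_eq_zero_iff_dvd num n).mp hd
          have htd : PySem.Int.truncdiv num n = num / n := by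
            unfold PySem.Int.truncdiv
            rw [Int.tdiv_eq_ediv]
            simp [hdvd]
          have hfd : PySem.Int.floordiv num n = num / n :=
            PySem.Int.floordiv_eq_ediv_of_pos (by omega)
          have hqn : num / n * n = num := Int.ediv_mul_cancel hdvd
          have hsq : n * n ≤ num := (le_sqrt_iff num n hn1).mp hcmp
          have hq3 : n ≤ num / n := by nlinarith
          rw [htd]
          rw [if_pos hd, if_pos (⟨by omega, by omega⟩ : 2 < num / n ∧ 2 < n), if_pos hq3]
          have hnot : (num / n, n) ∉ divisorRange num 3 (j : Int) := by
            intro hmem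
            have := (mem_divisorRange _ _ _ _ hmem).2.1
            simp only at this
            omega
          rw [PySem.Set.add_of_not_mem hnot, if_pos hd, hfd]
        · rw [if_neg hd, if_neg hd, List.append_nil]
      · have e1 : divisorRange num 3 ((j : Int)) = [] := divisorRange_empty _ _ _ (by omega)
        have e2 : divisorRange num 3 n = [] := divisorRange_empty _ _ _ (by omega)
        rw [e1, e2]
        unfold stepA
        have hno : ¬(2 < PySem.Int.truncdiv num n ∧ 2 < n) := by
          rintro ⟨-, h⟩; omega
        split_ifs with hd
        · rfl
        · rfl
    · have hm1 : min ((j : Int)) (Int.sqrt num) = Int.sqrt num := min_eq_right (by omega)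
      have hm2 : min n (Int.sqrt num) = Int.sqrt num := min_eq_right (by omega)
      rw [hm1, hm2]
      unfold stepA
      by_cases hd : PySem.Int.mod num n = 0
      · have hdvd : n ∣ num := (PySem.Int.mod_eq_zero_iff_dvd num n).mp hd
        have htd : PySem.Int.truncdiv num n = num / n := by
          unfold PySem.Int.truncdiv
          rw [Int.tdiv_eq_ediv]
          simp [hdvd]
        have hqn : num / n * n = num := Int.ediv_mul_cancel hdvd
        have hq1 : 1 ≤ num / n := (Int.le_ediv_iff_mul_le (by omega)).mpr (by omega)
        have hqlen : num / n ≤ n := by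
          by_contra hc
          push Not at hc
          have : n * n < num := by nlinarith
          exact hcmp ((le_sqrt_iff num n hn1).mpr (by omega))
        have hqs : num / n ≤ Int.sqrt num := by
          apply (le_sqrt_iff num (num / n) hq1).mpr
          nlinarith
        have hql : num / n < n := by omega
        rw [htd, if_pos hd]
        by_cases hc2 : 2 < num / n ∧ 2 < n
        · rw [if_pos hc2, if_neg (not_le.mpr hql)]
          have hdq : PySem.Int.mod num (num / n) = 0 := by
            rw [PySem.Int.mod_eq_zero_iff_dvd]
            exact ⟨n, hqn.symm⟩
          have hfq : PySem.Int.floordiv num (num / n) = n := by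
            rw [PySem.Int.floordiv_eq_ediv_of_pos (by omega)]
            calc num / (num / n) = (num / n) * n / (num / n) := by rw [hqn]
              _ = n := Int.mul_ediv_cancel_left n (by omega)
          have hmem : (n, num / n) ∈ divisorRange num 3 (Int.sqrt num) := by
            have := mem_divisorRange_of num 3 (Int.sqrt num) (num / n) (by omega) hqs hdq
            rwa [hfq] at this
          rw [PySem.Set.add_of_mem hmem]
        · rw [if_neg hc2]
      · rw [if_neg hd]

-- ===== VERDICT (by name: the statement is the Claim_ definition above) =====
theorem make_divisor_spec : Claim_equal_make_divisor := by
  intro num _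
  unfold Spec_make_divisor make_divisor make_divisor_alt
  by_cases hpos : 1 ≤ num
  · have h1 := afold num hpos num.toNat (by omega)
    have hcast : ((num.toNat : Nat) : Int) = num := by omega
    rw [hcast] at h1
    show (PySem.List.pyRange 1 (num + 1) 1).foldl (stepA num) [] = _
    rw [h1, min_eq_right (sqrt_le_self_int num (by omega)),
      altGo_eq num 3 PySem.Set.empty (le_refl 3) (by intro p hp; simp [PySem.Set.empty] at hp)]
    rfl
  · rw [altGo]
    rw [if_neg (show ¬(3 * 3 ≤ num) by omega)]
    have hr : PySem.List.pyRange 1 (num + 1) 1 = [] := by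
      rw [PySem.List.pyRange_one, show (num + 1 - 1).toNat = 0 by omega]
      rfl
    rw [hr]
    rfl
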